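-- pv_equiv track=rewrite | github.com/paiml/depyler | examples/hard_sec_secret_share.py | threshold_split
-- ===== SOURCE A (Python) =====
-- from typing import List, Tuple
--
-- def threshold_split(secret: int, t: int, n: int, prime: int, seed: int) -> List[Tuple[int, int]]:
--     coeffs: List[int] = [secret]
--     val: int = seed
--     for i in range(1, t):
--         val = ((val * 48271) + 1) & 0x7FFFFFFF
--         coeffs.append(val % prime)
--     shares: List[Tuple[int, int]] = []
--     for x in range(1, n + 1):
--         y: int = 0
--         power: int = 1
--         for c in coeffs:
--             y = (y + c * power) % prime
--             power = (power * x) % prime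
--         shares.append((x, y))
--     return shares
-- ===== SOURCE B (Python) =====
-- from typing import List, Tuple
--
-- def threshold_split(secret: int, t: int, n: int, prime: int, seed: int) -> List[Tuple[int, int]]:
--     coeffs: List[int] = [secret]
--     val: int = seed
--     for _ in range(1, t):
--         val = ((val * 48271) + 1) & 0x7FFFFFFF
--         coeffs.append(val % prime)
--
--     def horner(x: int) -> int:
--         y = 0
--         for c in reversed(coeffs):
--             y = (y * x + c) % prime
--         return y
--
--     return [(x, horner(x)) for x in range(1, n + 1)]
-- ===== Notes on version B (the rewrite author's own statement) =====
-- stated objective: alternative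
-- what changed: The inner share loop that maintained a separate running power accumulator (y += c*power; power *= x, two mods per coefficient) is replaced by Horner's method folding the coefficients in reverse with a single accumulator (y = y*x + c mod prime, one mod per coefficient), and the share list is built by a comprehension over a helper instead of append in a loop.
import Mathlib
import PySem

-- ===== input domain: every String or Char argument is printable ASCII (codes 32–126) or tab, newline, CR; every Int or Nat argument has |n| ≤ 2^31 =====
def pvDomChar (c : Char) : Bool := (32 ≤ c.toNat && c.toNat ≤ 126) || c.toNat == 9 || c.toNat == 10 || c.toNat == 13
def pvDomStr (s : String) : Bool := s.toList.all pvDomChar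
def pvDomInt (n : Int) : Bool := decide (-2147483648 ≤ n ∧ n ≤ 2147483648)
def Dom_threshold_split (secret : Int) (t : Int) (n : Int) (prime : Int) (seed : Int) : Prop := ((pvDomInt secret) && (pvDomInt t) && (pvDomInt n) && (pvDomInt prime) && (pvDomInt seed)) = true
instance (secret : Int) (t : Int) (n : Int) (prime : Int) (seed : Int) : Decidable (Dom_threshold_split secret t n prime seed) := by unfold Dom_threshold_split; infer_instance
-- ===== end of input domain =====

-- B replaces A's inner power-accumulator loop by Horner's method over the reversed
-- coefficient list (alternative decomposition, same asymptotic cost).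

-- ===== PORT A =====
-- coefficient loop shared verbatim by both Pythons: for i in range(1, t):
--   val = (val*48271+1) & 0x7FFFFFFF; coeffs.append(val % prime)
-- (tail recursion over the range list, append as cons + final reverse; same values)
def pvLcgCoeffs (prime : Int) : List Int → Int → List Int → List Int
  | [], _, acc => acc.reverse
  | _ :: rest, val, acc =>
      let v := PySem.Int.band (val * 48271 + 1) 0x7FFFFFFF
      pvLcgCoeffs prime rest v (PySem.Int.mod v prime :: acc)

-- shares = []; for x in range(1, n+1): y = 0; power = 1; for c in coeffs:
--   y = (y + c*power) % prime; power = (power*x) % prime; shares.append((x, y))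
def pvSharesA (prime : Int) (coeffs : List Int) : List Int → List (Int × Int) → List (Int × Int)
  | [], acc => acc.reverse
  | x :: rest, acc =>
      let yp := coeffs.foldl (fun (s : Int × Int) c =>
          (PySem.Int.mod (s.1 + c * s.2) prime, PySem.Int.mod (s.2 * x) prime)) (0, 1)
      pvSharesA prime coeffs rest ((x, yp.1) :: acc)

def threshold_split (secret : Int) (t : Int) (n : Int) (prime : Int) (seed : Int) : List (Int × Int) :=
  -- totality guard only: at prime = 0 Python raises ZeroDivisionError whenever a '%' runs (outside Pre_)
  if prime = 0 then [] else
  let coeffs : List Int := secret :: pvLcgCoeffs prime (PySem.List.pyRange 1 t 1) seed []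
  pvSharesA prime coeffs (PySem.List.pyRange 1 (n + 1) 1) []

-- ===== PORT B =====
def threshold_split_alt (secret : Int) (t : Int) (n : Int) (prime : Int) (seed : Int) : List (Int × Int) :=
  -- totality guard only: at prime = 0 Python raises ZeroDivisionError whenever a '%' runs (outside Pre_)
  if prime = 0 then [] else
  -- same LCG coefficient loop as A's source
  let coeffs : List Int := secret :: pvLcgCoeffs prime (PySem.List.pyRange 1 t 1) seed []
  -- def horner(x): y = 0; for c in reversed(coeffs): y = (y*x + c) % prime; return y
  let horner : Int → Int := fun x =>
    coeffs.reverse.foldl (fun y c => PySem.Int.mod (y * x + c) prime) 0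
  -- [(x, horner(x)) for x in range(1, n+1)]
  (PySem.List.pyRange 1 (n + 1) 1).map (fun x => (x, horner x))

-- ===== PRECONDITION & SPEC =====
-- Pre_ excludes exactly the inputs where Python A raises ZeroDivisionError:
-- prime == 0 while some '% prime' executes (t > 1 or n >= 1); B raises there too.
def Pre_threshold_split (secret : Int) (t : Int) (n : Int) (prime : Int) (seed : Int) : Prop :=
  prime ≠ 0 ∨ (t ≤ 1 ∧ n ≤ 0)
instance (secret : Int) (t : Int) (n : Int) (prime : Int) (seed : Int) : Decidable (Pre_threshold_split secret t n prime seed) := by unfold Pre_threshold_split; infer_instance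

def pvWitness_threshold_split : Int × Int × Int × Int × Int := (5, 3, 4, 7, 42)

def Spec_threshold_split (secret : Int) (t : Int) (n : Int) (prime : Int) (seed : Int) (out : List (Int × Int)) : Prop := out = threshold_split_alt secret t n prime seed
instance (secret : Int) (t : Int) (n : Int) (prime : Int) (seed : Int) (out : List (Int × Int)) : Decidable (Spec_threshold_split secret t n prime seed out) := by unfold Spec_threshold_split; infer_instance

-- ===== CLAIM (what is proved, stated in full; the proofs are below) =====
def Claim_equal_threshold_split : Prop := ∀ (secret : Int) (t : Int) (n : Int) (prime : Int) (seed : Int), Dom_threshold_split secret t n prime seed → Pre_threshold_split secret t n prime seed → Spec_threshold_split secret t n prime seed (threshold_split secret t n prime seed)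

-- ===== LEMMAS AND PROOFS =====

-- mathematical value of the polynomial with coefficient list cs at x
def pvPoly (x : Int) : List Int → Int
  | [] => 0
  | c :: rest => c + x * pvPoly x rest

theorem pvFmod_add_mul_fmod (a b m p : Int) :
    ((a.fmod p) + (b.fmod p) * m).fmod p = (a + b * m).fmod p := by
  conv_lhs => rw [Int.add_fmod, Int.mul_fmod, Int.fmod_fmod, Int.fmod_fmod,
    ← Int.mul_fmod, ← Int.add_fmod]

theorem pvFmod_mul_add_fmod (a b c p : Int) :
    ((a.fmod p) * b + c).fmod p = (a * b + c).fmod p := by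
  conv_lhs => rw [Int.add_fmod, Int.mul_fmod, Int.fmod_fmod,
    ← Int.mul_fmod, ← Int.add_fmod]

-- closed form of A's inner (y, power) loop
theorem pvA_inner (p x : Int) : ∀ (cs : List Int) (y w : Int), cs ≠ [] →
    (cs.foldl (fun (s : Int × Int) c =>
      (PySem.Int.mod (s.1 + c * s.2) p, PySem.Int.mod (s.2 * x) p)) (y, w)).1
    = (y + w * pvPoly x cs).fmod p := by
  intro cs
  induction cs with
  | nil => intro y w h; exact absurd rfl h
  | cons c rest ih =>
    intro y w _
    simp only [List.foldl_cons]
    by_cases hr : rest = []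
    · subst hr
      simp only [List.foldl_nil, PySem.Int.mod, pvPoly]
      congr 1; ring
    · rw [ih _ _ hr]
      simp only [PySem.Int.mod, pvPoly]
      calc ((y + c * w).fmod p + (w * x).fmod p * pvPoly x rest).fmod p
          = ((y + c * w) + (w * x) * pvPoly x rest).fmod p :=
            pvFmod_add_mul_fmod _ _ _ _
        _ = (y + w * (c + x * pvPoly x rest)).fmod p := by congr 1; ring

-- closed form of B's Horner loop over the reversed list
theorem pvB_inner (p x : Int) : ∀ (cs : List Int) (y : Int), cs ≠ [] →
    cs.reverse.foldl (fun y c => PySem.Int.mod (y * x + c) p) y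
    = (y * x ^ cs.length + pvPoly x cs).fmod p := by
  intro cs
  induction cs with
  | nil => intro y h; exact absurd rfl h
  | cons c rest ih =>
    intro y _
    rw [List.reverse_cons, List.foldl_append]
    by_cases hr : rest = []
    · subst hr
      simp only [List.reverse_nil, List.foldl_nil, List.foldl_cons, PySem.Int.mod,
        pvPoly, List.length_cons, List.length_nil]
      congr 1; ring
    · rw [ih _ hr]
      simp only [List.foldl_cons, List.foldl_nil, PySem.Int.mod, pvPoly, List.length_cons]
      calc ((y * x ^ rest.length + pvPoly x rest).fmod p * x + c).fmod p
          = ((y * x ^ rest.length + pvPoly x rest) * x + c).fmod p :=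
            pvFmod_mul_add_fmod _ _ _ _
        _ = (y * x ^ (rest.length + 1) + (c + x * pvPoly x rest)).fmod p := by
            congr 1; ring

theorem pvSharesA_eq_map (prime : Int) (coeffs : List Int) :
    ∀ (l : List Int) (acc : List (Int × Int)),
    pvSharesA prime coeffs l acc = acc.reverse ++ l.map (fun x => (x,
      (coeffs.foldl (fun (s : Int × Int) c =>
        (PySem.Int.mod (s.1 + c * s.2) prime, PySem.Int.mod (s.2 * x) prime)) (0, 1)).1)) := by
  intro l
  induction l with
  | nil => intro acc; simp [pvSharesA]
  | cons a rest ih => intro acc; simp [pvSharesA, ih]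

-- ===== VERDICT (by name: the statement is the Claim_ definition above) =====
theorem threshold_split_spec : Claim_equal_threshold_split := by
  intro secret t n prime seed _hdom _hpre
  unfold Spec_threshold_split threshold_split threshold_split_alt
  by_cases hp : prime = 0
  · simp [hp]
  simp only [if_neg hp]
  set coeffs := secret :: pvLcgCoeffs prime (PySem.List.pyRange 1 t 1) seed [] with hc
  have hne : coeffs ≠ [] := by rw [hc]; exact List.cons_ne_nil _ _
  rw [pvSharesA_eq_map]
  simp only [List.reverse_nil, List.nil_append]
  apply List.map_congr_left
  intro x _
  have hA := pvA_inner prime x coeffs 0 1 hne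
  have hB := pvB_inner prime x coeffs 0 hne

  rw [hA, hB]
  have h0 : (0:Int) + 1 * pvPoly x coeffs = 0 * x ^ coeffs.length + pvPoly x coeffs := by ring
  rw [h0]
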